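-- pv_equiv track=rewrite | github.com/sukajds/ff_iproxy | logic.py | merge_alive_fix_url_channels
-- ===== SOURCE A (Python) =====
-- def merge_alive_fix_url_channels(existing_channels, new_channels):
--     merged = [
--         {
--             'name': str(channel.get('name') or '').strip(),
--             'url': str(channel.get('url') or '').strip(),
--         }
--         for channel in existing_channels
--         if str(channel.get('name') or '').strip() and str(channel.get('url') or '').strip()
--     ]
--
--     for channel in new_channels:
--         channel_name = str(channel.get('name') or '').strip()
--         channel_url = str(channel.get('url') or '').strip()
--         if not channel_name or not channel_url:
--             continue
--
--         replace_index = None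
--         for index, existing in enumerate(merged):
--             existing_name = str(existing.get('name') or '').strip()
--             existing_url = str(existing.get('url') or '').strip()
--             if existing_name == channel_name or existing_url == channel_url:
--                 replace_index = index
--                 break
--
--         if replace_index is None:
--             merged.append({
--                 'name': channel_name,
--                 'url': channel_url,
--             })
--         else:
--             merged[replace_index] = {
--                 'name': channel_name,
--                 'url': channel_url,
--             }
--
--     return merged
-- ===== SOURCE B (Python) =====
-- def _clean(channel, key):
--     return str(channel.get(key) or '').strip()
--
--
-- def merge_alive_fix_url_channels(existing_channels, new_channels):
--     # Index-based merge: two dicts map each cleaned name/url to the set of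
--     # positions holding it; the first matching slot is the min of the two
--     # index sets, and the indexes are updated incrementally.
--     merged = []
--     by_name = {}
--     by_url = {}
--
--     def register(i, name, url):
--         by_name.setdefault(name, set()).add(i)
--         by_url.setdefault(url, set()).add(i)
--
--     for channel in existing_channels:
--         name, url = _clean(channel, 'name'), _clean(channel, 'url')
--         if name and url:
--             register(len(merged), name, url)
--             merged.append({'name': name, 'url': url})
--
--     for channel in new_channels:
--         name, url = _clean(channel, 'name'), _clean(channel, 'url')
--         if not name or not url:
--             continue
--         candidates = by_name.get(name, set()) | by_url.get(url, set())
--         if candidates: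
--             i = min(candidates)
--             old = merged[i]
--             by_name[old['name']].discard(i)
--             by_url[old['url']].discard(i)
--             register(i, name, url)
--             merged[i] = {'name': name, 'url': url}
--         else:
--             register(len(merged), name, url)
--             merged.append({'name': name, 'url': url})
--     return merged
-- ===== Notes on version B (the rewrite author's own statement) =====
-- stated objective: alternative
-- what changed: A rescans the merged list linearly for every new channel to find the first name/url match; B maintains two dicts mapping each cleaned name and url to the set of positions holding it, finds the replacement slot as the min of the two indexed sets and updates the indexes incrementally, so the inner scan disappears.
import Mathlib
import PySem

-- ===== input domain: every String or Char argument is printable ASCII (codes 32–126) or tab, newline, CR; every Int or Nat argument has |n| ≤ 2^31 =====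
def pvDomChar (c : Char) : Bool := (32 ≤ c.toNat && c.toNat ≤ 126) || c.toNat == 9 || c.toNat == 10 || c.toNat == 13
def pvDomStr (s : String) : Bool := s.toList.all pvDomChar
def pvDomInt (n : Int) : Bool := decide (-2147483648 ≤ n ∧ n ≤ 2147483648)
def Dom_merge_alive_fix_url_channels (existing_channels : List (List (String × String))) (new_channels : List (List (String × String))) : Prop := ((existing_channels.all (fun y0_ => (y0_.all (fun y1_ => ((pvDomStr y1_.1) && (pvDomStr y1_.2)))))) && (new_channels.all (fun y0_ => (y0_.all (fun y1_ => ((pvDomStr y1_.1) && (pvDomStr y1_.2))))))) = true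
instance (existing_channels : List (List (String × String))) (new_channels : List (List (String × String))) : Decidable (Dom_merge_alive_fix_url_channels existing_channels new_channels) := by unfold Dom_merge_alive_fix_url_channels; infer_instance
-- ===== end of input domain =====

-- B replaces A's per-channel linear rescan of the merged list with two dicts indexing
-- cleaned names/urls to the sets of positions holding them (replacement slot = min of the
-- matching index sets, updated incrementally); an alternative indexed algorithm.


-- ===== PORT A =====
-- str(channel.get(key) or '').strip(): get? is none on a missing key, 'or' maps None/'' to '', str of a str is itself
def pvCleanName (ch : List (String × String)) : String :=
  PySem.Str.strip (((PySem.Dict.mk ch).get? "name").getD "")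

def pvCleanUrl (ch : List (String × String)) : String :=
  PySem.Str.strip (((PySem.Dict.mk ch).get? "url").getD "")

-- the dict literal {'name': n, 'url': u}
def pvEntry (n u : String) : List (String × String) := [("name", n), ("url", u)]

-- A's inner 'for index, existing in enumerate(merged): ... break' scan for replace_index
def pvAFind (merged : List (List (String × String))) (n u : String) : Option Nat :=
  match merged with
  | [] => none
  | e :: rest =>
      if pvCleanName e = n ∨ pvCleanUrl e = u then some 0
      else (pvAFind rest n u).map (· + 1)

-- one iteration of A's 'for channel in new_channels' loop (continue / append / merged[i] = ...)
def pvAStep (merged : List (List (String × String))) (ch : List (String × String)) : List (List (String × String)) :=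
  let n := pvCleanName ch
  let u := pvCleanUrl ch
  if n = "" ∨ u = "" then merged
  else
    match pvAFind merged n u with
    | none => merged ++ [pvEntry n u]
    | some i => merged.set i (pvEntry n u)

def merge_alive_fix_url_channels (existing_channels : List (List (String × String))) (new_channels : List (List (String × String))) : List (List (String × String)) :=
  let merged := (existing_channels.filter
      (fun ch => decide (pvCleanName ch ≠ "" ∧ pvCleanUrl ch ≠ ""))).map
      (fun ch => pvEntry (pvCleanName ch) (pvCleanUrl ch))
  new_channels.foldl pvAStep merged

-- ===== PORT B =====
-- by_xxx.setdefault(key, set()).add(i): insert the updated set at the key (same position / appended if new)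
def pvBReg (d : PySem.Dict String (PySem.Set Nat)) (k : String) (i : Nat) : PySem.Dict String (PySem.Set Nat) :=
  d.insert k (PySem.Set.add (d.getD k []) i)

-- B's first loop: append the cleaned entry and register its position in both indexes
def pvBInit (st : List (List (String × String)) × PySem.Dict String (PySem.Set Nat) × PySem.Dict String (PySem.Set Nat))
    (ch : List (String × String)) :
    List (List (String × String)) × PySem.Dict String (PySem.Set Nat) × PySem.Dict String (PySem.Set Nat) :=
  let n := pvCleanName ch
  let u := pvCleanUrl ch
  if n ≠ "" ∧ u ≠ "" then
    (st.1 ++ [pvEntry n u], pvBReg st.2.1 n st.1.length, pvBReg st.2.2 u st.1.length)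
  else st

-- B's second loop: candidates = by_name.get(n, set()) | by_url.get(u, set()); min over it (empty set ↔ none);
-- on replace, deregister the old entry's position (dict lookup cannot miss: every stored position is registered) and register the new one
def pvBStep (st : List (List (String × String)) × PySem.Dict String (PySem.Set Nat) × PySem.Dict String (PySem.Set Nat))
    (ch : List (String × String)) :
    List (List (String × String)) × PySem.Dict String (PySem.Set Nat) × PySem.Dict String (PySem.Set Nat) :=
  let n := pvCleanName ch
  let u := pvCleanUrl ch
  if n = "" ∨ u = "" then st
  else
    let cand := PySem.Set.union (st.2.1.getD n []) (st.2.2.getD u [])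
    match PySem.List.min? cand (fun x => x) with
    | none => (st.1 ++ [pvEntry n u], pvBReg st.2.1 n st.1.length, pvBReg st.2.2 u st.1.length)
    | some i =>
        let old := (st.1[i]?).getD []
        let oldn := ((PySem.Dict.mk old).get? "name").getD ""
        let oldu := ((PySem.Dict.mk old).get? "url").getD ""
        (st.1.set i (pvEntry n u),
         pvBReg (st.2.1.insert oldn (PySem.Set.discard (st.2.1.getD oldn []) i)) n i,
         pvBReg (st.2.2.insert oldu (PySem.Set.discard (st.2.2.getD oldu []) i)) u i)

def merge_alive_fix_url_channels_alt (existing_channels : List (List (String × String))) (new_channels : List (List (String × String))) : List (List (String × String)) :=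
  (new_channels.foldl pvBStep (existing_channels.foldl pvBInit ([], PySem.Dict.empty, PySem.Dict.empty))).1

-- ===== PRECONDITION & SPEC =====
def Spec_merge_alive_fix_url_channels (existing_channels : List (List (String × String))) (new_channels : List (List (String × String))) (out : List (List (String × String))) : Prop := out = merge_alive_fix_url_channels_alt existing_channels new_channels
instance (existing_channels : List (List (String × String))) (new_channels : List (List (String × String))) (out : List (List (String × String))) : Decidable (Spec_merge_alive_fix_url_channels existing_channels new_channels out) := by unfold Spec_merge_alive_fix_url_channels; infer_instance

-- ===== CLAIM (what is proved, stated in full; the proofs are below) =====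
def Claim_equal_merge_alive_fix_url_channels : Prop := ∀ (existing_channels : List (List (String × String))) (new_channels : List (List (String × String))), Dom_merge_alive_fix_url_channels existing_channels new_channels → Spec_merge_alive_fix_url_channels existing_channels new_channels (merge_alive_fix_url_channels existing_channels new_channels)

-- ===== LEMMAS AND PROOFS =====

-- strip is idempotent ---------------------------------------------------------
theorem pvDropWhile_idem {α : Type} (p : α → Bool) (l : List α) :
    List.dropWhile p (List.dropWhile p l) = List.dropWhile p l := by
  induction l with
  | nil => rfl
  | cons a t ih =>
      by_cases h : p a
      · simp [h, ih]
      · simp [h]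

theorem pvHead_false_of_dropWhile_eq {α : Type} (p : α → Bool) (a : α) (t : List α)
    (h : List.dropWhile p (a :: t) = a :: t) : p a = false := by
  by_cases hp : p a
  · exfalso
    rw [List.dropWhile_cons, if_pos hp] at h
    have hlen := congrArg List.length h
    have hle := List.length_dropWhile_le p t
    simp at hlen
    omega
  · simpa using hp

theorem pvRstrip_idem (l : List Char) :
    PySem.Chars.rstrip (PySem.Chars.rstrip l) = PySem.Chars.rstrip l := by
  simp [PySem.Chars.rstrip, List.reverse_reverse, pvDropWhile_idem]

theorem pvLstrip_rstrip_lstrip (l : List Char) :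
    PySem.Chars.lstrip (PySem.Chars.rstrip (PySem.Chars.lstrip l))
      = PySem.Chars.rstrip (PySem.Chars.lstrip l) := by
  have hx : List.dropWhile PySem.Chars.isspace (List.dropWhile PySem.Chars.isspace l)
      = List.dropWhile PySem.Chars.isspace l := pvDropWhile_idem _ l
  cases hr : PySem.Chars.rstrip (PySem.Chars.lstrip l) with
  | nil => simp [PySem.Chars.lstrip]
  | cons a t =>
      have hpre : PySem.Chars.rstrip (PySem.Chars.lstrip l) <+: PySem.Chars.lstrip l := by
        have hs : List.dropWhile PySem.Chars.isspace (PySem.Chars.lstrip l).reverse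
            <:+ (PySem.Chars.lstrip l).reverse := List.dropWhile_suffix _
        have := List.reverse_prefix.mpr hs
        simpa [PySem.Chars.rstrip] using this
      rw [hr] at hpre
      obtain ⟨r, hrr⟩ := hpre
      have hxl : PySem.Chars.lstrip l = a :: (t ++ r) := by
        rw [← hrr]; simp
      have hpa : PySem.Chars.isspace a = false := by
        apply pvHead_false_of_dropWhile_eq PySem.Chars.isspace a (t ++ r)
        have := hx
        rw [show List.dropWhile PySem.Chars.isspace l = PySem.Chars.lstrip l from rfl, hxl] at this
        exact this
      simp [PySem.Chars.lstrip, hpa]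

theorem pvCharsStrip_idem (l : List Char) :
    PySem.Chars.strip (PySem.Chars.strip l) = PySem.Chars.strip l := by
  unfold PySem.Chars.strip
  rw [pvLstrip_rstrip_lstrip, pvRstrip_idem]

theorem pvStrip_idem (s : String) :
    PySem.Str.strip (PySem.Str.strip s) = PySem.Str.strip s := by
  simp [PySem.Str.strip, pvCharsStrip_idem]

theorem pvCleanName_stripped (ch : List (String × String)) :
    PySem.Str.strip (pvCleanName ch) = pvCleanName ch := by
  simp [pvCleanName, pvStrip_idem]

theorem pvCleanUrl_stripped (ch : List (String × String)) :
    PySem.Str.strip (pvCleanUrl ch) = pvCleanUrl ch := by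
  simp [pvCleanUrl, pvStrip_idem]

theorem pvCleanName_entry (n u : String) :
    pvCleanName (pvEntry n u) = PySem.Str.strip n := by
  simp [pvCleanName, pvEntry, PySem.Dict.get?_mk_cons]

theorem pvCleanUrl_entry (n u : String) :
    pvCleanUrl (pvEntry n u) = PySem.Str.strip u := by
  simp [pvCleanUrl, pvEntry, PySem.Dict.get?_mk_cons]

-- characterisation of A's first-match scan ------------------------------------
def pvMatches (m : List (List (String × String))) (n u : String) (i : Nat) : Prop :=
  ∃ e, m[i]? = some e ∧ (pvCleanName e = n ∨ pvCleanUrl e = u)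

theorem pvMatches_cons_succ (e : List (String × String)) (rest : List (List (String × String)))
    (n u : String) (i : Nat) :
    pvMatches (e :: rest) n u (i + 1) ↔ pvMatches rest n u i := by
  simp [pvMatches]

theorem pvAFind_none_iff (m : List (List (String × String))) (n u : String) :
    pvAFind m n u = none ↔ ∀ i, ¬ pvMatches m n u i := by
  induction m with
  | nil => simp [pvAFind, pvMatches]
  | cons e rest ih =>
      by_cases hp : pvCleanName e = n ∨ pvCleanUrl e = u
      · simp only [pvAFind, if_pos hp]
        constructor
        · intro h; cases h
        · intro h; exact absurd ⟨e, by simp, hp⟩ (h 0)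
      · simp only [pvAFind, if_neg hp, Option.map_eq_none_iff, ih]
        constructor
        · intro h i
          cases i with
          | zero => rintro ⟨e', he', hm⟩; simp at he'; subst he'; exact hp hm
          | succ j => rw [pvMatches_cons_succ]; exact h j
        · intro h i; rw [← pvMatches_cons_succ e rest n u i]; exact h (i + 1)

theorem pvAFind_some (m : List (List (String × String))) (n u : String) (j : Nat)
    (h : pvAFind m n u = some j) :
    pvMatches m n u j ∧ ∀ k, pvMatches m n u k → j ≤ k := by
  induction m generalizing j with
  | nil => simp [pvAFind] at h
  | cons e rest ih =>
      by_cases hp : pvCleanName e = n ∨ pvCleanUrl e = u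
      · simp only [pvAFind, if_pos hp, Option.some.injEq] at h
        subst h
        exact ⟨⟨e, by simp, hp⟩, fun k _ => Nat.zero_le k⟩
      · simp only [pvAFind, if_neg hp, Option.map_eq_some_iff] at h
        obtain ⟨j', hj', rfl⟩ := h
        obtain ⟨hm, hmin⟩ := ih j' hj'
        refine ⟨(pvMatches_cons_succ e rest n u j').mpr hm, ?_⟩
        intro k hk
        cases k with
        | zero =>
            obtain ⟨e', he', hme⟩ := hk
            simp at he'; subst he'; exact absurd hme hp
        | succ k' => exact Nat.succ_le_succ (hmin k' ((pvMatches_cons_succ e rest n u k').mp hk))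

-- the invariant: entries are exactly the cleaned dicts, and each index dict maps
-- a string to precisely the positions whose cleaned name/url equals it
def pvInv (m : List (List (String × String)))
    (dn du : PySem.Dict String (PySem.Set Nat)) : Prop :=
  (∀ e ∈ m, e = pvEntry (pvCleanName e) (pvCleanUrl e)) ∧
  (∀ s i, i ∈ dn.getD s [] ↔ ∃ e, m[i]? = some e ∧ pvCleanName e = s) ∧
  (∀ s i, i ∈ du.getD s [] ↔ ∃ e, m[i]? = some e ∧ pvCleanUrl e = s)

theorem pvInv_empty : pvInv [] PySem.Dict.empty PySem.Dict.empty := by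
  refine ⟨by simp, ?_, ?_⟩ <;> intro s i <;> simp [PySem.Dict.getD_empty]

theorem pvBReg_getD (d : PySem.Dict String (PySem.Set Nat)) (k : String) (i : Nat) (s : String) :
    (pvBReg d k i).getD s [] = if s = k then PySem.Set.add (d.getD k []) i else d.getD s [] := by
  simp [pvBReg, PySem.Dict.getD_insert]

theorem pvCand_iff (m : List (List (String × String))) (dn du : PySem.Dict String (PySem.Set Nat))
    (h : pvInv m dn du) (n u : String) (i : Nat) :
    i ∈ PySem.Set.union (dn.getD n []) (du.getD u []) ↔ pvMatches m n u i := by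
  rw [PySem.Set.mem_union, h.2.1 n i, h.2.2 u i]
  constructor
  · rintro (⟨e, he, hc⟩ | ⟨e, he, hc⟩)
    · exact ⟨e, he, Or.inl hc⟩
    · exact ⟨e, he, Or.inr hc⟩
  · rintro ⟨e, he, hc | hc⟩
    · exact Or.inl ⟨e, he, hc⟩
    · exact Or.inr ⟨e, he, hc⟩

-- appending a fresh cleaned entry and registering position m.length
theorem pvInv_append (m : List (List (String × String))) (dn du : PySem.Dict String (PySem.Set Nat))
    (n u : String) (h : pvInv m dn du)
    (hn : PySem.Str.strip n = n) (hu : PySem.Str.strip u = u) :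
    pvInv (m ++ [pvEntry n u]) (pvBReg dn n m.length) (pvBReg du u m.length) := by
  obtain ⟨hwf, hdn, hdu⟩ := h
  have hcn : pvCleanName (pvEntry n u) = n := by rw [pvCleanName_entry, hn]
  have hcu : pvCleanUrl (pvEntry n u) = u := by rw [pvCleanUrl_entry, hu]
  refine ⟨?_, ?_, ?_⟩
  · intro e he
    rcases List.mem_append.mp he with h1 | h1
    · exact hwf e h1
    · simp at h1; subst h1; rw [hcn, hcu]
  · intro s i
    rw [pvBReg_getD]
    by_cases hs : s = n
    · subst hs
      rw [if_pos rfl, PySem.Set.mem_add, hdn s i]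
      constructor
      · rintro (⟨e, he, hc⟩ | rfl)
        · have hi : i < m.length := (List.getElem?_eq_some_iff.mp he).1
          exact ⟨e, by rw [List.getElem?_append_left hi]; exact he, hc⟩
        · exact ⟨pvEntry s u, by simp, by rw [hcn]⟩
      · rintro ⟨e, he, hc⟩
        by_cases hi : i < m.length
        · rw [List.getElem?_append_left hi] at he; exact Or.inl ⟨e, he, hc⟩
        · have hlt : i < m.length + 1 := by
            have := (List.getElem?_eq_some_iff.mp he).1; simpa using this
          have hieq : i = m.length := by omega
          exact Or.inr hieq
    · rw [if_neg hs, hdn s i]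
      constructor
      · rintro ⟨e, he, hc⟩
        have hi : i < m.length := (List.getElem?_eq_some_iff.mp he).1
        exact ⟨e, by rw [List.getElem?_append_left hi]; exact he, hc⟩
      · rintro ⟨e, he, hc⟩
        by_cases hi : i < m.length
        · rw [List.getElem?_append_left hi] at he; exact ⟨e, he, hc⟩
        · have hlt : i < m.length + 1 := by
            have := (List.getElem?_eq_some_iff.mp he).1; simpa using this
          have hieq : i = m.length := by omega
          subst hieq
          rw [List.getElem?_concat_length] at he
          cases he; rw [hcn] at hc; exact absurd hc.symm hs
  · intro s i
    rw [pvBReg_getD]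
    by_cases hs : s = u
    · subst hs
      rw [if_pos rfl, PySem.Set.mem_add, hdu s i]
      constructor
      · rintro (⟨e, he, hc⟩ | rfl)
        · have hi : i < m.length := (List.getElem?_eq_some_iff.mp he).1
          exact ⟨e, by rw [List.getElem?_append_left hi]; exact he, hc⟩
        · exact ⟨pvEntry n s, by simp, by rw [hcu]⟩
      · rintro ⟨e, he, hc⟩
        by_cases hi : i < m.length
        · rw [List.getElem?_append_left hi] at he; exact Or.inl ⟨e, he, hc⟩
        · have hlt : i < m.length + 1 := by
            have := (List.getElem?_eq_some_iff.mp he).1; simpa using this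
          have hieq : i = m.length := by omega
          exact Or.inr hieq
    · rw [if_neg hs, hdu s i]
      constructor
      · rintro ⟨e, he, hc⟩
        have hi : i < m.length := (List.getElem?_eq_some_iff.mp he).1
        exact ⟨e, by rw [List.getElem?_append_left hi]; exact he, hc⟩
      · rintro ⟨e, he, hc⟩
        by_cases hi : i < m.length
        · rw [List.getElem?_append_left hi] at he; exact ⟨e, he, hc⟩
        · have hlt : i < m.length + 1 := by
            have := (List.getElem?_eq_some_iff.mp he).1; simpa using this
          have hieq : i = m.length := by omega
          subst hieq
          rw [List.getElem?_concat_length] at he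
          cases he; rw [hcu] at hc; exact absurd hc.symm hs

theorem pvInv_replace (m : List (List (String × String))) (dn du : PySem.Dict String (PySem.Set Nat))
    (n u : String) (i : Nat) (e0 : List (String × String))
    (h : pvInv m dn du) (he0 : m[i]? = some e0)
    (hn : PySem.Str.strip n = n) (hu : PySem.Str.strip u = u) :
    pvInv (m.set i (pvEntry n u))
      (pvBReg (dn.insert (pvCleanName e0) (PySem.Set.discard (dn.getD (pvCleanName e0) []) i)) n i)
      (pvBReg (du.insert (pvCleanUrl e0) (PySem.Set.discard (du.getD (pvCleanUrl e0) []) i)) u i) := by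
  obtain ⟨hwf, hdn, hdu⟩ := h
  have hi : i < m.length := (List.getElem?_eq_some_iff.mp he0).1
  have hcn : pvCleanName (pvEntry n u) = n := by rw [pvCleanName_entry, hn]
  have hcu : pvCleanUrl (pvEntry n u) = u := by rw [pvCleanUrl_entry, hu]
  have hgetset : ∀ k : Nat, k ≠ i → (m.set i (pvEntry n u))[k]? = m[k]? := by
    intro k hk; rw [List.getElem?_set_ne (by omega)]
  have hgeti : (m.set i (pvEntry n u))[i]? = some (pvEntry n u) := by
    rw [List.getElem?_set_self]; simp [hi]
  refine ⟨?_, ?_, ?_⟩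
  · intro e he
    rcases List.mem_or_eq_of_mem_set he with h1 | h1
    · exact hwf e h1
    · subst h1; rw [hcn, hcu]
  · intro s k
    rw [pvBReg_getD]
    by_cases hs : s = n
    · rw [hs, if_pos rfl, PySem.Set.mem_add]
      by_cases hk : k = i
      · subst hk
        simp only [hgeti]
        constructor
        · intro _; exact ⟨pvEntry n u, rfl, hcn⟩
        · intro _; simp
      · rw [hgetset k hk]
        have hmid : k ∈ (dn.insert (pvCleanName e0) (PySem.Set.discard (dn.getD (pvCleanName e0) []) i)).getD n []
            ↔ k ∈ dn.getD n [] := by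
          rw [PySem.Dict.getD_insert]
          by_cases hno : n = pvCleanName e0
          · rw [if_pos hno, PySem.Set.mem_discard, hno]
            exact ⟨fun h => h.1, fun h => ⟨h, hk⟩⟩
          · rw [if_neg hno]
        rw [hmid, hdn n k]
        constructor
        · rintro (h1 | h1)
          · exact h1
          · exact absurd h1 hk
        · exact Or.inl
    · rw [if_neg hs, PySem.Dict.getD_insert]
      by_cases hk : k = i
      · subst hk
        simp only [hgeti]
        by_cases hso : s = pvCleanName e0
        · rw [if_pos hso, PySem.Set.mem_discard]
          constructor
          · rintro ⟨_, hne⟩; exact absurd rfl hne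
          · rintro ⟨e, he, hc⟩; cases he; rw [hcn] at hc; exact absurd hc.symm hs
        · rw [if_neg hso, hdn s k]
          constructor
          · rintro ⟨e, he, hc⟩
            rw [he0] at he; cases he; exact absurd hc.symm hso
          · rintro ⟨e, he, hc⟩; cases he; rw [hcn] at hc; exact absurd hc.symm hs
      · rw [hgetset k hk]
        by_cases hso : s = pvCleanName e0
        · rw [if_pos hso, PySem.Set.mem_discard, hso, hdn (pvCleanName e0) k]
          exact ⟨fun h => h.1, fun h => ⟨h, hk⟩⟩
        · rw [if_neg hso, hdn s k]
  · intro s k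
    rw [pvBReg_getD]
    by_cases hs : s = u
    · rw [hs, if_pos rfl, PySem.Set.mem_add]
      by_cases hk : k = i
      · subst hk
        simp only [hgeti]
        constructor
        · intro _; exact ⟨pvEntry n u, rfl, hcu⟩
        · intro _; simp
      · rw [hgetset k hk]
        have hmid : k ∈ (du.insert (pvCleanUrl e0) (PySem.Set.discard (du.getD (pvCleanUrl e0) []) i)).getD u []
            ↔ k ∈ du.getD u [] := by
          rw [PySem.Dict.getD_insert]
          by_cases hno : u = pvCleanUrl e0
          · rw [if_pos hno, PySem.Set.mem_discard, hno]
            exact ⟨fun h => h.1, fun h => ⟨h, hk⟩⟩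
          · rw [if_neg hno]
        rw [hmid, hdu u k]
        constructor
        · rintro (h1 | h1)
          · exact h1
          · exact absurd h1 hk
        · exact Or.inl
    · rw [if_neg hs, PySem.Dict.getD_insert]
      by_cases hk : k = i
      · subst hk
        simp only [hgeti]
        by_cases hso : s = pvCleanUrl e0
        · rw [if_pos hso, PySem.Set.mem_discard]
          constructor
          · rintro ⟨_, hne⟩; exact absurd rfl hne
          · rintro ⟨e, he, hc⟩; cases he; rw [hcu] at hc; exact absurd hc.symm hs
        · rw [if_neg hso, hdu s k]
          constructor
          · rintro ⟨e, he, hc⟩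
            rw [he0] at he; cases he; exact absurd hc.symm hso
          · rintro ⟨e, he, hc⟩; cases he; rw [hcu] at hc; exact absurd hc.symm hs
      · rw [hgetset k hk]
        by_cases hso : s = pvCleanUrl e0
        · rw [if_pos hso, PySem.Set.mem_discard, hso, hdu (pvCleanUrl e0) k]
          exact ⟨fun h => h.1, fun h => ⟨h, hk⟩⟩
        · rw [if_neg hso, hdu s k]

-- one step of the merge loop: B's indexed lookup finds exactly A's first match
set_option maxHeartbeats 1000000 in
theorem pvStep_eq (m : List (List (String × String))) (dn du : PySem.Dict String (PySem.Set Nat))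
    (ch : List (String × String)) (h : pvInv m dn du) :
    (pvBStep (m, dn, du) ch).1 = pvAStep m ch ∧
      pvInv (pvBStep (m, dn, du) ch).1 (pvBStep (m, dn, du) ch).2.1 (pvBStep (m, dn, du) ch).2.2 := by
  by_cases hc : pvCleanName ch = "" ∨ pvCleanUrl ch = ""
  · have hB : pvBStep (m, dn, du) ch = (m, dn, du) := by
      simp only [pvBStep, if_pos hc]
    have hA : pvAStep m ch = m := by
      simp only [pvAStep, if_pos hc]
    rw [hB, hA]; exact ⟨rfl, h⟩
  · have hns : PySem.Str.strip (pvCleanName ch) = pvCleanName ch := pvCleanName_stripped ch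
    have hus : PySem.Str.strip (pvCleanUrl ch) = pvCleanUrl ch := pvCleanUrl_stripped ch
    cases hmin : PySem.List.min? (PySem.Set.union (dn.getD (pvCleanName ch) []) (du.getD (pvCleanUrl ch) [])) (fun x => x) with
    | none =>
        have hempty : PySem.Set.union (dn.getD (pvCleanName ch) []) (du.getD (pvCleanUrl ch) []) = [] :=
          (PySem.List.min?_eq_none_iff _ _).mp hmin
        have hnone : pvAFind m (pvCleanName ch) (pvCleanUrl ch) = none := by
          rw [pvAFind_none_iff]
          intro i hm
          have := (pvCand_iff m dn du h (pvCleanName ch) (pvCleanUrl ch) i).mpr hm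
          rw [hempty] at this; cases this
        have hB : pvBStep (m, dn, du) ch
            = (m ++ [pvEntry (pvCleanName ch) (pvCleanUrl ch)],
               pvBReg dn (pvCleanName ch) m.length, pvBReg du (pvCleanUrl ch) m.length) := by
          simp only [pvBStep, if_neg hc, hmin]
        have hA : pvAStep m ch = m ++ [pvEntry (pvCleanName ch) (pvCleanUrl ch)] := by
          simp only [pvAStep, if_neg hc, hnone]
        rw [hB, hA]
        exact ⟨rfl, pvInv_append m dn du (pvCleanName ch) (pvCleanUrl ch) h hns hus⟩
    | some i =>
        have hmem : i ∈ PySem.Set.union (dn.getD (pvCleanName ch) []) (du.getD (pvCleanUrl ch) []) :=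
          PySem.List.min?_mem hmin
        have hmi : pvMatches m (pvCleanName ch) (pvCleanUrl ch) i :=
          (pvCand_iff m dn du h (pvCleanName ch) (pvCleanUrl ch) i).mp hmem
        have hminle : ∀ y ∈ PySem.Set.union (dn.getD (pvCleanName ch) []) (du.getD (pvCleanUrl ch) []), i ≤ y :=
          fun y hy => PySem.List.min?_isMin hmin y hy
        -- A's scan cannot return none, and returns exactly the minimum i
        have hfind : pvAFind m (pvCleanName ch) (pvCleanUrl ch) = some i := by
          cases hf : pvAFind m (pvCleanName ch) (pvCleanUrl ch) with
          | none => exact absurd hmi ((pvAFind_none_iff m _ _).mp hf i)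
          | some j =>
              obtain ⟨hmj, hjmin⟩ := pvAFind_some m _ _ j hf
              have h1 : j ≤ i := hjmin i hmi
              have h2 : i ≤ j := hminle j ((pvCand_iff m dn du h _ _ j).mpr hmj)
              rw [Nat.le_antisymm h1 h2]
        obtain ⟨e0, he0, _⟩ := hmi
        have hwf := h.1 e0 (List.mem_of_getElem? he0)
        have hold : ((m[i]?).getD []) = e0 := by rw [he0]; rfl
        have holdn : ((PySem.Dict.mk ((m[i]?).getD [])).get? "name").getD "" = pvCleanName e0 := by
          rw [hold]
          conv_lhs => rw [hwf]
          simp [pvEntry, PySem.Dict.get?_mk_cons]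
        have holdu : ((PySem.Dict.mk ((m[i]?).getD [])).get? "url").getD "" = pvCleanUrl e0 := by
          rw [hold]
          conv_lhs => rw [hwf]
          simp [pvEntry, PySem.Dict.get?_mk_cons]
        have hB : pvBStep (m, dn, du) ch
            = (m.set i (pvEntry (pvCleanName ch) (pvCleanUrl ch)),
               pvBReg (dn.insert (pvCleanName e0) (PySem.Set.discard (dn.getD (pvCleanName e0) []) i)) (pvCleanName ch) i,
               pvBReg (du.insert (pvCleanUrl e0) (PySem.Set.discard (du.getD (pvCleanUrl e0) []) i)) (pvCleanUrl ch) i) := by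
          simp only [pvBStep, if_neg hc, hmin, holdn, holdu]
        have hA : pvAStep m ch = m.set i (pvEntry (pvCleanName ch) (pvCleanUrl ch)) := by
          simp only [pvAStep, if_neg hc, hfind]
        rw [hB, hA]
        exact ⟨rfl, pvInv_replace m dn du (pvCleanName ch) (pvCleanUrl ch) i e0 h he0 hns hus⟩

theorem pvLoop_eq (l : List (List (String × String))) :
    ∀ st : List (List (String × String)) × PySem.Dict String (PySem.Set Nat) × PySem.Dict String (PySem.Set Nat),
      pvInv st.1 st.2.1 st.2.2 → (l.foldl pvBStep st).1 = l.foldl pvAStep st.1 := by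
  induction l with
  | nil => intro st _; rfl
  | cons ch t ih =>
      rintro ⟨m, dn, du⟩ h
      obtain ⟨h1, h2⟩ := pvStep_eq m dn du ch h
      rw [List.foldl_cons, List.foldl_cons, ← h1]
      exact ih (pvBStep (m, dn, du) ch) h2

theorem pvInit_eq (l : List (List (String × String))) (m : List (List (String × String)))
    (dn du : PySem.Dict String (PySem.Set Nat)) (h : pvInv m dn du) :
    (l.foldl pvBInit (m, dn, du)).1
        = m ++ (l.filter (fun ch => decide (pvCleanName ch ≠ "" ∧ pvCleanUrl ch ≠ ""))).map
            (fun ch => pvEntry (pvCleanName ch) (pvCleanUrl ch)) ∧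
      pvInv (l.foldl pvBInit (m, dn, du)).1 (l.foldl pvBInit (m, dn, du)).2.1
        (l.foldl pvBInit (m, dn, du)).2.2 := by
  induction l generalizing m dn du with
  | nil => exact ⟨by simp, h⟩
  | cons ch t ih =>
      by_cases hp : pvCleanName ch ≠ "" ∧ pvCleanUrl ch ≠ ""
      · have hstep : pvBInit (m, dn, du) ch
            = (m ++ [pvEntry (pvCleanName ch) (pvCleanUrl ch)],
               pvBReg dn (pvCleanName ch) m.length, pvBReg du (pvCleanUrl ch) m.length) := by
          simp only [pvBInit, if_pos hp]
        have hinv' := pvInv_append m dn du (pvCleanName ch) (pvCleanUrl ch) h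
          (pvCleanName_stripped ch) (pvCleanUrl_stripped ch)
        obtain ⟨ih1, ih2⟩ := ih _ _ _ hinv'
        rw [List.foldl_cons, hstep]
        refine ⟨?_, ih2⟩
        rw [ih1, List.filter_cons, if_pos (by simpa using hp)]
        simp [List.append_assoc]
      · have hstep : pvBInit (m, dn, du) ch = (m, dn, du) := by
          simp only [pvBInit, if_neg hp]
        obtain ⟨ih1, ih2⟩ := ih _ _ _ h
        rw [List.foldl_cons, hstep]
        refine ⟨?_, ih2⟩
        rw [ih1, List.filter_cons, if_neg (by simpa using hp)]

-- ===== VERDICT (by name: the statement is the Claim_ definition above) =====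
theorem merge_alive_fix_url_channels_spec : Claim_equal_merge_alive_fix_url_channels := by
  intro ec nc _
  unfold Spec_merge_alive_fix_url_channels
  unfold merge_alive_fix_url_channels merge_alive_fix_url_channels_alt
  obtain ⟨h1, h2⟩ := pvInit_eq ec [] PySem.Dict.empty PySem.Dict.empty pvInv_empty
  rw [pvLoop_eq nc (ec.foldl pvBInit ([], PySem.Dict.empty, PySem.Dict.empty)) h2, h1]
  simp
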